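-- pv_equiv track=rewrite | github.com/JinEunPark/solveAlgo | algo/gre1.py | solution
-- ===== SOURCE A (Python) =====
-- def check(survey_, choices_, result_dict):
--     s_list = list(survey_)
--     if choices_ == 4:
--         pass
--     elif choices_ <= 3:
--         result_dict[s_list[0]] += 4 - choices_
--     else:
--         result_dict[s_list[1]] += choices_ - 4
--
-- def gernerate_answer(result_dict):
--     answer = []
--     if result_dict["R"] >= result_dict["T"]:
--         answer.append("R")
--     else:
--         answer.append("T")
--
--     if result_dict["C"] >= result_dict["F"]:
--         answer.append("C")
--     else:
--         answer.append("F")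
--
--     if result_dict["J"] >= result_dict["M"]:
--         answer.append("J")
--     else:
--         answer.append("M")
--
--     if result_dict["A"] >= result_dict["N"]:
--         answer.append("A")
--     else:
--         answer.append("N")
--     return answer
--
-- def solution(survey, choices):
--     type = {"R", "T", "C", "F", "J", "M", "A", "N"}
--     result_dict = {x: 0 for x in type}
--     for i in range(len(survey)):
--         check(survey[i], choices[i], result_dict)
--     ans = gernerate_answer(result_dict)
--     answer = ''
--
--     for i in ans:
--         answer += i
--
--     return answer
-- ===== SOURCE B (Python) =====
-- def solution(survey, choices):
--     def net(p, q):
--         t = 0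
--         for i in range(len(survey)):
--             c = choices[i]
--             if c == 4:
--                 continue
--             letter = survey[i][0] if c <= 3 else survey[i][1]
--             w = 4 - c if c <= 3 else c - 4
--             if letter == p:
--                 t += w
--             elif letter == q:
--                 t -= w
--         return t
--     return ''.join(p if net(p, q) >= 0 else q
--                    for p, q in (("R", "T"), ("C", "F"), ("J", "M"), ("A", "N")))
-- ===== Notes on version B (the rewrite author's own statement) =====
-- stated objective: simpler
-- what changed: Replaces A's eight-counter dict (helper-mutated per question, then compared pairwise and joined char-by-char) with one signed net score per MBTI axis computed by a per-axis pass, emitting the positive letter when the net is >= 0.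
import Mathlib
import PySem

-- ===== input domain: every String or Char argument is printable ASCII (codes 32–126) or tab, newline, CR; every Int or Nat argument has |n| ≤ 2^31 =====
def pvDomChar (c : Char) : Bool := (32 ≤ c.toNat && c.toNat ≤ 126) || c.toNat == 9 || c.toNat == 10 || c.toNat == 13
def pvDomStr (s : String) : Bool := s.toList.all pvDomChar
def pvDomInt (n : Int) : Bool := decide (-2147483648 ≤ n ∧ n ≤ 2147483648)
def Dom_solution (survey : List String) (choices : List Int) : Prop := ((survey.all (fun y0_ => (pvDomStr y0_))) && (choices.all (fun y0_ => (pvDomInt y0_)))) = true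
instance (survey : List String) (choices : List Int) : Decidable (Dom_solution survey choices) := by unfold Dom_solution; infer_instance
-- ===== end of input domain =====

-- B replaces A's eight-counter dict and append-based answer builder with one signed
-- net score per MBTI axis, computed by a per-axis pass (objective: simpler).

-- ===== PORT A =====
def pvLetters : List Char := ['R', 'T', 'C', 'F', 'J', 'M', 'A', 'N']

def pvCheck (s : String) (c : Int) (d : PySem.Dict Char Int) : PySem.Dict Char Int :=
  if c = 4 then d
  else if c ≤ 3 then
    match PySem.List.pyGet? s.toList 0 with
    | some ch => d.modify ch 0 (· + (4 - c))
    | none => d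
  else
    match PySem.List.pyGet? s.toList 1 with
    | some ch => d.modify ch 0 (· + (c - 4))
    | none => d

def pvGenerate (d : PySem.Dict Char Int) : List Char :=
  [if d.getD 'R' 0 ≥ d.getD 'T' 0 then 'R' else 'T',
   if d.getD 'C' 0 ≥ d.getD 'F' 0 then 'C' else 'F',
   if d.getD 'J' 0 ≥ d.getD 'M' 0 then 'J' else 'M',
   if d.getD 'A' 0 ≥ d.getD 'N' 0 then 'A' else 'N']

def solution (survey : List String) (choices : List Int) : String :=
  let d0 := PySem.Dict.ofList (pvLetters.map (fun ch => (ch, (0 : Int))))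
  let d := (List.range survey.length).foldl (fun d i =>
    match PySem.List.pyGet? survey (Int.ofNat i), PySem.List.pyGet? choices (Int.ofNat i) with
    | some s, some c => pvCheck s c d
    | _, _ => d) d0
  String.mk ((pvGenerate d).foldl (fun acc ch => acc ++ [ch]) [])

-- ===== PORT B =====
-- body of B's per-question loop (one question's effect on the axis total)
def pvBStep (p q : Char) (t : Int) (s : String) (c : Int) : Int :=
  if c = 4 then t
  else
    let l := s.toList
    let letter := if c ≤ 3 then l.getD 0 ' ' else l.getD 1 ' '
    let w := if c ≤ 3 then 4 - c else c - 4
    if letter = p then t + w else if letter = q then t - w else t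

def pvNet (survey : List String) (choices : List Int) (p q : Char) : Int :=
  (List.range survey.length).foldl (fun t i =>
    match PySem.List.pyGet? choices (Int.ofNat i) with
    | none => t
    | some c => pvBStep p q t ((PySem.List.pyGet? survey (Int.ofNat i)).getD "") c) 0

def solution_alt (survey : List String) (choices : List Int) : String :=
  String.mk ([('R','T'), ('C','F'), ('J','M'), ('A','N')].map
    (fun pr => if pvNet survey choices pr.1 pr.2 ≥ 0 then pr.1 else pr.2))

-- ===== PRECONDITION & SPEC =====
def pvOk (s : String) (c : Int) : Bool :=
  if c = 4 then true
  else if c ≤ 3 then decide (1 ≤ s.toList.length) && decide (s.toList.getD 0 ' ' ∈ pvLetters)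
  else decide (2 ≤ s.toList.length) && decide (s.toList.getD 1 ' ' ∈ pvLetters)

-- Pre_ excludes exactly the inputs on which Python A raises: a choices list shorter than
-- survey (IndexError), a too-short survey string (IndexError), or a scored letter outside
-- the eight MBTI letters (KeyError).
def Pre_solution (survey : List String) (choices : List Int) : Prop :=
  survey.length ≤ choices.length ∧
  ∀ i < survey.length, pvOk (survey.getD i "") (choices.getD i 0) = true

instance (survey : List String) (choices : List Int) : Decidable (Pre_solution survey choices) := by
  unfold Pre_solution; infer_instance

def pvWitness_solution : List String × List Int := (["RT", "CF", "JM", "AN"], [1, 7, 4, 5])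

def Spec_solution (survey : List String) (choices : List Int) (out : String) : Prop := out = solution_alt survey choices
instance (survey : List String) (choices : List Int) (out : String) : Decidable (Spec_solution survey choices out) := by unfold Spec_solution; infer_instance

-- ===== CLAIM (what is proved, stated in full; the proofs are below) =====
def Claim_equal_solution : Prop := ∀ (survey : List String) (choices : List Int), Dom_solution survey choices → Pre_solution survey choices → Spec_solution survey choices (solution survey choices)

-- ===== LEMMAS AND PROOFS =====

-- per-question contribution of a (survey string, choice) pair to letter ch's counter in A's dict
def pvContrib1 (s : String) (c : Int) (ch : Char) : Int :=
  if c = 4 then 0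
  else if c ≤ 3 then (if s.toList.getD 0 ' ' = ch then 4 - c else 0)
  else (if s.toList.getD 1 ' ' = ch then c - 4 else 0)

def pvContrib (survey : List String) (choices : List Int) (ch : Char) (i : Nat) : Int :=
  pvContrib1 (survey.getD i "") (choices.getD i 0) ch

-- running total of contributions over the first n questions
def pvSum (survey : List String) (choices : List Int) (ch : Char) (n : Nat) : Int :=
  (List.range n).foldl (fun t i => t + pvContrib survey choices ch i) 0

-- one A-step moves every counter by its contribution (needs the length side of pvOk)
lemma pvCheck_getD (s : String) (c : Int) (d : PySem.Dict Char Int) (ch : Char)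
    (hok : pvOk s c = true) :
    (pvCheck s c d).getD ch 0 = d.getD ch 0 + pvContrib1 s c ch := by
  unfold pvOk at hok
  unfold pvCheck pvContrib1
  by_cases h4 : c = 4
  · simp [h4]
  · by_cases h3 : c ≤ 3
    · simp only [h4, if_false, h3, if_true] at hok ⊢
      obtain ⟨hlen, -⟩ := Bool.and_eq_true_iff.mp hok
      match hl : s.toList with
      | [] => simp [hl] at hlen
      | x :: xs =>
        simp only [PySem.List.pyGet?_zero_cons, List.getD_cons_zero,
          PySem.Dict.getD_modify]
        by_cases hc : ch = x
        · subst hc; simp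
        · rw [if_neg hc, if_neg (show ¬x = ch from fun h => hc h.symm), add_zero]
    · simp only [h4, if_false, h3, if_false] at hok ⊢
      obtain ⟨hlen, -⟩ := Bool.and_eq_true_iff.mp hok
      match hl : s.toList with
      | [] => simp [hl] at hlen
      | [x] => simp [hl] at hlen
      | x :: y :: xs =>
        have h1 : PySem.List.pyGet? (x :: y :: xs) 1 = some y := by
          simp [PySem.List.pyGet?, PySem.List.pyIdx?]
        simp only [h1, List.getD_cons_succ, List.getD_cons_zero,
          PySem.Dict.getD_modify]
        by_cases hc : ch = y
        · subst hc; simp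
        · rw [if_neg hc, if_neg (show ¬y = ch from fun h => hc h.symm), add_zero]

-- the initial dict maps every character to 0 under getD
lemma d0_getD (ch : Char) :
    (PySem.Dict.ofList (pvLetters.map (fun ch => (ch, (0 : Int))))).getD ch 0 = 0 := by
  have h : PySem.Dict.ofList (pvLetters.map (fun ch => (ch, (0 : Int))))
      = PySem.Dict.mk [('R',0),('T',0),('C',0),('F',0),('J',0),('M',0),('A',0),('N',0)] := by rfl
  rw [h]
  simp only [PySem.Dict.getD, PySem.Dict.get?_mk_cons]
  split_ifs <;> rfl

lemma pvSum_succ (survey : List String) (choices : List Int) (ch : Char) (n : Nat) :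
    pvSum survey choices ch (n + 1)
      = pvSum survey choices ch n + pvContrib1 (survey.getD n "") (choices.getD n 0) ch := by
  rw [pvSum, List.range_succ, List.foldl_append, List.foldl_cons, List.foldl_nil]
  rfl

-- the dict after the first n questions holds pvSum for every letter
lemma dict_invariant (survey : List String) (choices : List Int)
    (hlen : survey.length ≤ choices.length)
    (hok : ∀ i < survey.length, pvOk (survey.getD i "") (choices.getD i 0) = true)
    (n : Nat) (hn : n ≤ survey.length) (ch : Char) :
    ((List.range n).foldl (fun d i =>
      match PySem.List.pyGet? survey (Int.ofNat i), PySem.List.pyGet? choices (Int.ofNat i) with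
      | some s, some c => pvCheck s c d
      | _, _ => d) (PySem.Dict.ofList (pvLetters.map (fun ch => (ch, (0 : Int)))))).getD ch 0
    = pvSum survey choices ch n := by
  induction n with
  | zero => simp [pvSum, d0_getD]
  | succ n ih =>
    have hn' : n < survey.length := hn
    have hs : PySem.List.pyGet? survey (Int.ofNat n) = some (survey.getD n "") := by
      have := PySem.List.pyGet?_natCast (xs := survey) (n := n)
      rw [Int.ofNat_eq_natCast, this, List.getElem?_eq_getElem hn', List.getD_eq_getElem _ _ hn']
    have hc : PySem.List.pyGet? choices (Int.ofNat n) = some (choices.getD n 0) := by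
      have hn'' : n < choices.length := lt_of_lt_of_le hn' hlen
      have := PySem.List.pyGet?_natCast (xs := choices) (n := n)
      rw [Int.ofNat_eq_natCast, this, List.getElem?_eq_getElem hn'', List.getD_eq_getElem _ _ hn'']
    rw [List.range_succ, List.foldl_append, List.foldl_cons, List.foldl_nil, hs, hc]
    dsimp only
    rw [pvCheck_getD _ _ _ _ (hok n hn'), ih (le_of_lt hn'), pvSum_succ]

-- one B-step adds the difference of the two letters' contributions
lemma pvBStep_eq (p q : Char) (hpq : p ≠ q) (t : Int) (s : String) (c : Int) :
    pvBStep p q t s c = t + (pvContrib1 s c p - pvContrib1 s c q) := by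
  unfold pvBStep pvContrib1
  by_cases h4 : c = 4
  · simp [h4]
  · by_cases h3 : c ≤ 3
    · simp only [h4, if_false, h3, if_true]
      by_cases hp : s.toList.getD 0 ' ' = p
      · simp only [hp, if_neg hpq, if_true]; ring
      · by_cases hq : s.toList.getD 0 ' ' = q
        · simp only [hp, hq, if_neg (show ¬q = p from fun h => hpq h.symm), if_true]; ring
        · simp only [hp, if_false, hq]; ring
    · simp only [h4, if_false, h3, if_false]
      by_cases hp : s.toList.getD 1 ' ' = p
      · simp only [hp, if_neg hpq, if_true]; ring
      · by_cases hq : s.toList.getD 1 ' ' = q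
        · simp only [hp, hq, if_neg (show ¬q = p from fun h => hpq h.symm), if_true]; ring
        · simp only [hp, if_false, hq]; ring

-- B's per-axis pass computes the difference of the two letter sums
lemma net_invariant (survey : List String) (choices : List Int)
    (hlen : survey.length ≤ choices.length)
    (p q : Char) (hpq : p ≠ q) :
    pvNet survey choices p q
      = pvSum survey choices p survey.length - pvSum survey choices q survey.length := by
  unfold pvNet
  suffices h : ∀ n, n ≤ survey.length →
      (List.range n).foldl (fun t i =>
        match PySem.List.pyGet? choices (Int.ofNat i) with
        | none => t
        | some c => pvBStep p q t ((PySem.List.pyGet? survey (Int.ofNat i)).getD "") c) 0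
      = pvSum survey choices p n - pvSum survey choices q n from h _ le_rfl
  intro n hn
  induction n with
  | zero => simp [pvSum]
  | succ n ih =>
    have hn' : n < survey.length := hn
    have hs : PySem.List.pyGet? survey (Int.ofNat n) = some (survey.getD n "") := by
      have := PySem.List.pyGet?_natCast (xs := survey) (n := n)
      rw [Int.ofNat_eq_natCast, this, List.getElem?_eq_getElem hn', List.getD_eq_getElem _ _ hn']
    have hc : PySem.List.pyGet? choices (Int.ofNat n) = some (choices.getD n 0) := by
      have hn'' : n < choices.length := lt_of_lt_of_le hn' hlen
      have := PySem.List.pyGet?_natCast (xs := choices) (n := n)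
      rw [Int.ofNat_eq_natCast, this, List.getElem?_eq_getElem hn'', List.getD_eq_getElem _ _ hn'']
    rw [List.range_succ, List.foldl_append, List.foldl_cons, List.foldl_nil, hs, hc]
    dsimp only
    rw [Option.getD_some, ih (le_of_lt hn'), pvBStep_eq p q hpq, pvSum_succ, pvSum_succ]
    ring

theorem solution_spec : Claim_equal_solution := by
  intro survey choices _hdom hpre
  obtain ⟨hlen, hok⟩ := hpre
  unfold Spec_solution solution solution_alt
  dsimp only
  rw [PySem.List.foldl_append_singleton]
  simp only [List.nil_append, pvGenerate, List.map_cons, List.map_nil]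
  have hd := dict_invariant survey choices hlen hok survey.length le_rfl
  rw [hd 'R', hd 'T', hd 'C', hd 'F', hd 'J', hd 'M', hd 'A', hd 'N',
    net_invariant survey choices hlen 'R' 'T' (by decide),
    net_invariant survey choices hlen 'C' 'F' (by decide),
    net_invariant survey choices hlen 'J' 'M' (by decide),
    net_invariant survey choices hlen 'A' 'N' (by decide)]
  simp only [ge_iff_le, Int.sub_nonneg]
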